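-- pv_equiv track=rewrite | github.com/davbych/Tasks-by-Mikhail | 3. Algo/#6_often_values.py | most_frequent_value_count
-- ===== SOURCE A (Python) =====
-- def most_frequent_value_count(n, q, array, queries):
--     result = []
--     for i, j in queries:
--         left = i - 1
--         right = j - 1
--         if left > right or left < 0 or right >= n:
--             result.append(0)
--             continue
--         max_count = 0
--         current_count = 1
--         for idx in range(left + 1, right + 1):
--             if array[idx] == array[idx - 1]:
--                 current_count += 1
--             else:
--                 max_count = max(max_count, current_count)
--                 current_count = 1
--         max_count = max(max_count, current_count)
--         result.append(max_count)
--     return result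
-- ===== SOURCE B (Python) =====
-- def most_frequent_value_count(n, q, array, queries):
--     # start[k] = index at which the run of equal values containing position k begins
--     start = []
--     for k in range(len(array)):
--         start.append(start[k - 1] if k > 0 and array[k] == array[k - 1] else k)
--     result = []
--     for i, j in queries:
--         left, right = i - 1, j - 1
--         if left > right or left < 0 or right >= n:
--             result.append(0)
--         else:
--             result.append(max(k - max(start[k], left) + 1 for k in range(left, right + 1)))
--     return result
-- ===== Notes on version B (the rewrite author's own statement) =====
-- stated objective: alternative
-- what changed: Replaces A's per-query two-counter streaming scan with a run-start array precomputed once over the whole array; each query answer is then the max of the closed-form clipped run length k - max(start[k], left) + 1 over the range.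
-- outside the precondition, e.g. on most_frequent_value_count(10, 1, [1, 2], [(5, 5)]): A returns [1], B raises IndexError
import Mathlib
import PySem

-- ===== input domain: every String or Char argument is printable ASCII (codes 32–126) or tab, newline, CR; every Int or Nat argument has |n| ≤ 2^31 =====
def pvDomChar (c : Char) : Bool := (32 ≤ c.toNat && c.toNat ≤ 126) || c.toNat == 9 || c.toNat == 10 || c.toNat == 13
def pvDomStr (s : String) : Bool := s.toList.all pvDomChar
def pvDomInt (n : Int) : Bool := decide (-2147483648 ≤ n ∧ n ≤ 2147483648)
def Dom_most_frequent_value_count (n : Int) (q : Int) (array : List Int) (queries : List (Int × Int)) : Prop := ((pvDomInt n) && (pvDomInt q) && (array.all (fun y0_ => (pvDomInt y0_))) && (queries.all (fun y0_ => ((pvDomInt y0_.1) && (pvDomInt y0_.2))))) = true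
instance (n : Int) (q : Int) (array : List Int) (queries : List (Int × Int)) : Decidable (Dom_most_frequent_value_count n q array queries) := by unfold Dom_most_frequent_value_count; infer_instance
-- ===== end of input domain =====

-- B replaces A's per-query two-counter scan by a run-start array precomputed once,
-- each query answer being a max of a closed-form clipped run length (objective: alternative).

-- ===== PORT A =====
-- array[idx] is ported as pyGetD; exact under Pre_, where every accessed index is in range.
def most_frequent_value_count (n : Int) (q : Int) (array : List Int) (queries : List (Int × Int)) : List Int :=
  queries.foldl (fun result pq =>
    let left := pq.1 - 1
    let right := pq.2 - 1
    if left > right ∨ left < 0 ∨ right ≥ n then result ++ [0]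
    else
      let st := (PySem.List.pyRange (left + 1) (right + 1) 1).foldl
        (fun (st : Int × Int) idx =>
          if PySem.List.pyGetD array idx 0 = PySem.List.pyGetD array (idx - 1) 0
          then (st.1, st.2 + 1) else (max st.1 st.2, 1)) (0, 1)
      result ++ [max st.1 st.2]) []

-- ===== PORT B =====
-- start[k] built by the same loop Source B runs; start[k-1] / array[k] as pyGetD (in range under Pre_).
def pvStarts (array : List Int) : List Int :=
  (PySem.List.pyRange 0 (array.length : Int) 1).foldl
    (fun start k =>
      start ++ [if k > 0 ∧ PySem.List.pyGetD array k 0 = PySem.List.pyGetD array (k - 1) 0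
                then PySem.List.pyGetD start (k - 1) 0 else k]) []

def most_frequent_value_count_alt (n : Int) (q : Int) (array : List Int) (queries : List (Int × Int)) : List Int :=
  let start := pvStarts array
  queries.foldl (fun result pq =>
    let left := pq.1 - 1
    let right := pq.2 - 1
    if left > right ∨ left < 0 ∨ right ≥ n then result ++ [0]
    else
      result ++ [(PySem.List.max?
        ((PySem.List.pyRange left (right + 1) 1).map
          (fun k => k - max (PySem.List.pyGetD start k 0) left + 1))
        (fun y => y)).getD 0]) []

-- ===== PRECONDITION & SPEC =====
-- Pre_ excludes inputs where some accepted query range (left ≤ right, 0 ≤ left, right < n)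
-- reaches past the end of array: there A raises IndexError — except in the accidental
-- single-point case left = right, where it returns 1 without reading the array — and B raises.
def Pre_most_frequent_value_count (n : Int) (q : Int) (array : List Int) (queries : List (Int × Int)) : Prop :=
  ∀ p ∈ queries, (p.1 - 1 ≤ p.2 - 1 ∧ 0 ≤ p.1 - 1 ∧ p.2 - 1 < n) → p.2 - 1 < (array.length : Int)
instance (n : Int) (q : Int) (array : List Int) (queries : List (Int × Int)) : Decidable (Pre_most_frequent_value_count n q array queries) := by unfold Pre_most_frequent_value_count; infer_instance

def pvWitness_most_frequent_value_count : Int × Int × List Int × (List (Int × Int)) :=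
  (3, 2, [1, 1, 2], [(1, 3), (2, 2)])

def Spec_most_frequent_value_count (n : Int) (q : Int) (array : List Int) (queries : List (Int × Int)) (out : List Int) : Prop := out = most_frequent_value_count_alt n q array queries
instance (n : Int) (q : Int) (array : List Int) (queries : List (Int × Int)) (out : List Int) : Decidable (Spec_most_frequent_value_count n q array queries out) := by unfold Spec_most_frequent_value_count; infer_instance

-- ===== CLAIM (what is proved, stated in full; the proofs are below) =====
def Claim_equal_most_frequent_value_count : Prop := ∀ (n : Int) (q : Int) (array : List Int) (queries : List (Int × Int)), Dom_most_frequent_value_count n q array queries → Pre_most_frequent_value_count n q array queries → Spec_most_frequent_value_count n q array queries (most_frequent_value_count n q array queries)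

-- ===== LEMMAS AND PROOFS =====

-- A's inner-loop step, named for the proofs (definitionally the lambda in the port).
def pvStep (array : List Int) (st : Int × Int) (idx : Int) : Int × Int :=
  if PySem.List.pyGetD array idx 0 = PySem.List.pyGetD array (idx - 1) 0
  then (st.1, st.2 + 1) else (max st.1 st.2, 1)

-- recursive specification of B's run-start array
def startVal (array : List Int) : Nat → Int
  | 0 => 0
  | k + 1 => if array.getD (k + 1) 0 = array.getD k 0 then startVal array k else ((k : Int) + 1)

theorem startVal_le (array : List Int) (k : Nat) : startVal array k ≤ (k : Int) := by
  induction k with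
  | zero => simp [startVal]
  | succ k ih =>
    simp only [startVal]
    split
    · exact le_trans ih (by push_cast; omega)
    · push_cast; omega

theorem pvStarts_aux (array : List Int) : ∀ m : Nat,
    (PySem.List.pyRange 0 (m : Int) 1).foldl
      (fun start k =>
        start ++ [if k > 0 ∧ PySem.List.pyGetD array k 0 = PySem.List.pyGetD array (k - 1) 0
                  then PySem.List.pyGetD start (k - 1) 0 else k]) []
    = (List.range m).map (startVal array) := by
  intro m
  induction m with
  | zero =>
      rw [Nat.cast_zero, PySem.List.pyRange_one_eq_nil (le_refl 0)]
      simp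
  | succ m ih =>
      rw [show ((m + 1 : Nat) : Int) = (m : Int) + 1 by push_cast; ring,
          PySem.List.pyRange_one_succ_right (by positivity)]
      simp only [List.foldl_append, List.foldl_cons, List.foldl_nil]
      rw [ih, List.range_succ, List.map_append, List.map_cons, List.map_nil]
      congr 1
      congr 1
      cases m with
      | zero => simp [startVal]
      | succ j =>
          rw [show ((j + 1 : Nat) : Int) - 1 = ((j : Nat) : Int) by push_cast; ring]
          simp only [PySem.List.pyGetD_natCast]
          have hget : ((List.range (j + 1)).map (startVal array)).getD j 0 = startVal array j := by
            simp [List.getD_eq_getElem?_getD]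
          rw [hget]
          by_cases hc : array.getD (j + 1) 0 = array.getD j 0 <;>
            simp [startVal, hc]

theorem pvStarts_eq (array : List Int) :
    pvStarts array = (List.range array.length).map (startVal array) := by
  unfold pvStarts
  exact pvStarts_aux array array.length

theorem pvStarts_get (array : List Int) (k : Int) (h0 : 0 ≤ k) (hk : k < (array.length : Int)) :
    PySem.List.pyGetD (pvStarts array) k 0 = startVal array k.toNat := by
  rw [pvStarts_eq, show k = ((k.toNat : Nat) : Int) by omega, PySem.List.pyGetD_natCast]
  have hlt : k.toNat < array.length := by omega
  simp [List.getD_eq_getElem?_getD, hlt]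
  rw [max_eq_left h0]

theorem scan_inv (array : List Int) (l : Int) (h0 : 0 ≤ l) :
    ∀ d : Nat, l + (d : Int) < (array.length : Int) →
      (((PySem.List.pyRange (l + 1) (l + (d : Int) + 1) 1).foldl (pvStep array) (0, 1)).2
          = (l + (d : Int)) - max (startVal array (l + (d : Int)).toNat) l + 1)
      ∧ 0 ≤ ((PySem.List.pyRange (l + 1) (l + (d : Int) + 1) 1).foldl (pvStep array) (0, 1)).1
      ∧ max ((PySem.List.pyRange (l + 1) (l + (d : Int) + 1) 1).foldl (pvStep array) (0, 1)).1
            ((PySem.List.pyRange (l + 1) (l + (d : Int) + 1) 1).foldl (pvStep array) (0, 1)).2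
          = (PySem.List.pyRange (l + 1) (l + (d : Int) + 1) 1).foldl
              (fun acc k => max acc (k - max (startVal array k.toNat) l + 1)) 1 := by
  intro d
  induction d with
  | zero =>
      intro _
      simp only [Nat.cast_zero, add_zero]
      rw [PySem.List.pyRange_one_eq_nil (le_refl (l + 1))]
      simp only [List.foldl_nil]
      have hs : startVal array l.toNat ≤ l := by
        have := startVal_le array l.toNat
        rwa [Int.toNat_of_nonneg h0] at this
      rw [max_eq_right hs]
      refine ⟨by show (1 : Int) = l - l + 1; ring, le_refl 0, ?_⟩
      show max (0 : Int) 1 = 1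
      norm_num
  | succ d ih =>
      intro hlen
      have hlen' : l + (d : Int) < (array.length : Int) := by push_cast at hlen; omega
      obtain ⟨ih1, ih2, ih3⟩ := ih hlen'
      rw [show l + ((d + 1 : Nat) : Int) = l + (d : Int) + 1 by push_cast; ring]
      rw [PySem.List.pyRange_one_succ_right (by omega : l + 1 ≤ l + (d : Int) + 1)]
      simp only [List.foldl_append, List.foldl_cons, List.foldl_nil]
      have jkey : (l + (d : Int) + 1).toNat = (l + (d : Int)).toNat + 1 := by omega
      have c1 : PySem.List.pyGetD array (l + (d : Int) + 1) 0
          = array.getD ((l + (d : Int)).toNat + 1) 0 := by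
        rw [show l + (d : Int) + 1 = (((l + (d : Int)).toNat + 1 : Nat) : Int) by omega,
            PySem.List.pyGetD_natCast]
      have c2 : PySem.List.pyGetD array (l + (d : Int) + 1 - 1) 0
          = array.getD ((l + (d : Int)).toNat) 0 := by
        rw [show l + (d : Int) + 1 - 1 = (((l + (d : Int)).toNat : Nat) : Int) by omega,
            PySem.List.pyGetD_natCast]
      simp only [pvStep, c1, c2, jkey, startVal]
      by_cases hc : array.getD ((l + (d : Int)).toNat + 1) 0 = array.getD ((l + (d : Int)).toNat) 0
      · simp only [if_pos hc]
        refine ⟨?_, ih2, ?_⟩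
        · show _ + 1 = _
          rw [ih1]; ring
        · have harg : l + (d : Int) + 1 - max (startVal array (l + (d : Int)).toNat) l + 1
              = ((PySem.List.pyRange (l + 1) (l + (d : Int) + 1) 1).foldl (pvStep array) (0, 1)).2 + 1 := by
            rw [ih1]; ring
          show max _ (_ + 1) = max _ (l + (d : Int) + 1 - max (startVal array (l + (d : Int)).toNat) l + 1)
          rw [harg, ← ih3]
          generalize ((PySem.List.pyRange (l + 1) (l + (d : Int) + 1) 1).foldl (pvStep array) (0, 1)).1 = a
          generalize ((PySem.List.pyRange (l + 1) (l + (d : Int) + 1) 1).foldl (pvStep array) (0, 1)).2 = b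
          rw [max_assoc, max_eq_right (by omega : b ≤ b + 1)]
      · simp only [if_neg hc]
        have hstv : ((l + (d : Int)).toNat : Int) + 1 = l + (d : Int) + 1 := by omega
        rw [hstv, max_eq_left (by omega : l ≤ l + (d : Int) + 1)]
        refine ⟨by show (1 : Int) = _; ring, ?_, ?_⟩
        · show 0 ≤ max _ _
          exact le_trans ih2 (le_max_left _ _)
        · show max (max _ _) 1 = max _ (l + (d : Int) + 1 - (l + (d : Int) + 1) + 1)
          rw [show l + (d : Int) + 1 - (l + (d : Int) + 1) + 1 = (1 : Int) by ring, ← ih3]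

theorem query_eq (array : List Int) (l r : Int) (h0 : 0 ≤ l) (hlr : l ≤ r)
    (hr : r < (array.length : Int)) :
    max (((PySem.List.pyRange (l + 1) (r + 1) 1).foldl (pvStep array) (0, 1)).1)
        (((PySem.List.pyRange (l + 1) (r + 1) 1).foldl (pvStep array) (0, 1)).2)
      = (PySem.List.max? ((PySem.List.pyRange l (r + 1) 1).map
          (fun k => k - max (PySem.List.pyGetD (pvStarts array) k 0) l + 1)) (fun y => y)).getD 0 := by
  have hd : l + (((r - l).toNat : Nat) : Int) = r := by omega
  rw [PySem.List.pyRange_one_cons (by omega : l < r + 1), List.map_cons,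
      PySem.List.max?_id_cons, Option.getD_some, List.foldl_map]
  have hgl : l - max (PySem.List.pyGetD (pvStarts array) l 0) l + 1 = 1 := by
    rw [pvStarts_get array l h0 (by omega)]
    have hs : startVal array l.toNat ≤ l := by
      have := startVal_le array l.toNat
      rwa [Int.toNat_of_nonneg h0] at this
    rw [max_eq_right hs]; ring
  rw [hgl]
  have gen : ∀ (R : List Int), (∀ k ∈ R, 0 ≤ k ∧ k < (array.length : Int)) → ∀ init : Int,
      R.foldl (fun acc k => max acc (k - max (startVal array k.toNat) l + 1)) init
      = R.foldl (fun acc k => max acc (k - max (PySem.List.pyGetD (pvStarts array) k 0) l + 1)) init := by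
    intro R
    induction R with
    | nil => intro _ _; rfl
    | cons x xs ihR =>
        intro hmem init
        simp only [List.foldl_cons]
        rw [pvStarts_get array x (hmem x (by simp)).1 (hmem x (by simp)).2]
        exact ihR (fun k hk => hmem k (by simp [hk])) _
  obtain ⟨-, -, h3⟩ := scan_inv array l h0 (r - l).toNat (by rw [hd]; exact hr)
  rw [hd] at h3
  rw [h3, gen (PySem.List.pyRange (l + 1) (r + 1) 1)
        (fun k hk => by rw [PySem.List.mem_pyRange_one] at hk; exact ⟨by omega, by omega⟩) 1]

-- per-query values of the two ports
def pvAval (n : Int) (array : List Int) (pq : Int × Int) : Int :=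
  let left := pq.1 - 1
  let right := pq.2 - 1
  if left > right ∨ left < 0 ∨ right ≥ n then 0
  else
    let st := (PySem.List.pyRange (left + 1) (right + 1) 1).foldl
      (fun (st : Int × Int) idx =>
        if PySem.List.pyGetD array idx 0 = PySem.List.pyGetD array (idx - 1) 0
        then (st.1, st.2 + 1) else (max st.1 st.2, 1)) (0, 1)
    max st.1 st.2

def pvBval (n : Int) (array : List Int) (pq : Int × Int) : Int :=
  let left := pq.1 - 1
  let right := pq.2 - 1
  if left > right ∨ left < 0 ∨ right ≥ n then 0
  else
    (PySem.List.max?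
      ((PySem.List.pyRange left (right + 1) 1).map
        (fun k => k - max (PySem.List.pyGetD (pvStarts array) k 0) left + 1))
      (fun y => y)).getD 0

theorem pvA_aux (n : Int) (array : List Int) : ∀ (qs : List (Int × Int)) (acc : List Int),
    qs.foldl (fun result pq =>
      let left := pq.1 - 1
      let right := pq.2 - 1
      if left > right ∨ left < 0 ∨ right ≥ n then result ++ [0]
      else
        let st := (PySem.List.pyRange (left + 1) (right + 1) 1).foldl
          (fun (st : Int × Int) idx =>
            if PySem.List.pyGetD array idx 0 = PySem.List.pyGetD array (idx - 1) 0
            then (st.1, st.2 + 1) else (max st.1 st.2, 1)) (0, 1)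
        result ++ [max st.1 st.2]) acc
    = acc ++ qs.map (pvAval n array) := by
  intro qs
  induction qs with
  | nil => intro acc; simp
  | cons p ps ih =>
      intro acc
      simp only [List.foldl_cons, List.map_cons]
      rw [ih]
      simp only [pvAval]
      split_ifs <;> simp [List.append_assoc]

theorem pvB_aux (n : Int) (array : List Int) : ∀ (qs : List (Int × Int)) (acc : List Int),
    qs.foldl (fun result pq =>
      let left := pq.1 - 1
      let right := pq.2 - 1
      if left > right ∨ left < 0 ∨ right ≥ n then result ++ [0]
      else
        result ++ [(PySem.List.max?
          ((PySem.List.pyRange left (right + 1) 1).map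
            (fun k => k - max (PySem.List.pyGetD (pvStarts array) k 0) left + 1))
          (fun y => y)).getD 0]) acc
    = acc ++ qs.map (pvBval n array) := by
  intro qs
  induction qs with
  | nil => intro acc; simp
  | cons p ps ih =>
      intro acc
      simp only [List.foldl_cons, List.map_cons]
      rw [ih]
      simp only [pvBval]
      split_ifs <;> simp [List.append_assoc]

theorem pvA_eq (n q : Int) (array : List Int) (queries : List (Int × Int)) :
    most_frequent_value_count n q array queries = queries.map (pvAval n array) := by
  unfold most_frequent_value_count
  simpa using pvA_aux n array queries []

theorem pvB_eq (n q : Int) (array : List Int) (queries : List (Int × Int)) :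
    most_frequent_value_count_alt n q array queries = queries.map (pvBval n array) := by
  show List.foldl _ [] queries = _
  simpa using pvB_aux n array queries []

theorem val_eq (n : Int) (array : List Int) (p : Int × Int)
    (hp : (p.1 - 1 ≤ p.2 - 1 ∧ 0 ≤ p.1 - 1 ∧ p.2 - 1 < n) → p.2 - 1 < (array.length : Int)) :
    pvAval n array p = pvBval n array p := by
  by_cases h : p.1 - 1 > p.2 - 1 ∨ p.1 - 1 < 0 ∨ p.2 - 1 ≥ n
  · simp only [pvAval, pvBval]
    rw [if_pos h, if_pos h]
  · have hlen : p.2 - 1 < (array.length : Int) := hp ⟨by omega, by omega, by omega⟩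
    simp only [pvAval, pvBval]
    rw [if_neg h, if_neg h]
    exact query_eq array (p.1 - 1) (p.2 - 1) (by omega) (by omega) hlen

-- ===== VERDICT (by name: the statement is the Claim_ definition above) =====
theorem most_frequent_value_count_spec : Claim_equal_most_frequent_value_count := by
  intro n q array queries _ hpre
  unfold Spec_most_frequent_value_count
  rw [pvA_eq, pvB_eq]
  exact List.map_congr_left (fun p hp => val_eq n array p (hpre p hp))
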